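-- pv_equiv track=rewrite | github.com/Muhammad-Hassan31144/SHIKRA | src/shikra/combine.py | _identify_attack_phases
-- ===== SOURCE A (Python) =====
-- from typing import Dict, Any, List, Optional
--
-- def _identify_attack_phases(timeline: List[Dict[str, Any]]) -> List[str]:
--     """Identify attack phases from timeline."""
--     phases = []
--
--     # Simple heuristic based on event types
--     has_process_events = any("process" in event.get("event", "").lower() for event in timeline)
--     has_network_events = any(event.get("source") == "Network" for event in timeline)
--     has_file_events = any("file" in event.get("event", "").lower() for event in timeline)
--
--     if has_process_events:
--         phases.append("Initial execution")
--     if has_network_events: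
--         phases.append("Command and control")
--     if has_file_events:
--         phases.append("Data collection/exfiltration")
--
--     return phases if phases else ["Unknown"]
-- ===== SOURCE B (Python) =====
-- _PHASE_NAMES = ("Initial execution", "Command and control", "Data collection/exfiltration")
--
--
-- def _classify_event(event):
--     """Return the set of phase indices a single event evidences."""
--     indices = set()
--     ev = event.get("event", "").lower()
--     if "process" in ev:
--         indices.add(0)
--     if event.get("source") == "Network":
--         indices.add(1)
--     if "file" in ev:
--         indices.add(2)
--     return indices
--
--
-- def _identify_attack_phases(timeline):
--     """Identify attack phases from timeline (event-centric classification)."""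
--     found = set()
--     for event in timeline:
--         found |= _classify_event(event)
--         if len(found) == 3:
--             break
--     return [name for i, name in enumerate(_PHASE_NAMES) if i in found] or ["Unknown"]
-- ===== Notes on version B (the rewrite author's own statement) =====
-- stated objective: alternative
-- what changed: B classifies each event into a set of phase indices (event-centric), unions those sets in one pass with an early exit once all three phases are seen, and renders the result by filtering a static name table, instead of A's three per-phase any() scans with an if/append chain.
import Mathlib
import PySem

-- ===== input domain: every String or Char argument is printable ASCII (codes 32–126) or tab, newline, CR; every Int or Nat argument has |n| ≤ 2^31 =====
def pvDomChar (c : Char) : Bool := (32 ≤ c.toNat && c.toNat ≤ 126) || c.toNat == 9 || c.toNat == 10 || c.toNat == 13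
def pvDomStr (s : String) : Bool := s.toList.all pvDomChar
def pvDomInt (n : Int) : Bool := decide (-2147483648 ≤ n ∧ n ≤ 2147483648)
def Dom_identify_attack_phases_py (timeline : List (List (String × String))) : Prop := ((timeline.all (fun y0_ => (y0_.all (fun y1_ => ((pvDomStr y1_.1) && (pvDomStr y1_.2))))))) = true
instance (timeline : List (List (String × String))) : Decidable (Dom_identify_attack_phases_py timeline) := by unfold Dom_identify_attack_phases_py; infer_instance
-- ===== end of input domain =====

-- B classifies each event into a set of phase indices, unions them in one pass with early exit,
-- and renders the result from a static name table (objective: alternative decomposition).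

-- ===== PORT A =====
def identify_attack_phases_py (timeline : List (List (String × String))) : List String :=
  let has_process_events := timeline.any (fun event =>
    PySem.Str.isIn "process" (PySem.Str.lower ((PySem.Dict.ofList event).getD "event" "")))
  let has_network_events := timeline.any (fun event =>
    (PySem.Dict.ofList event).get? "source" == some "Network")
  let has_file_events := timeline.any (fun event =>
    PySem.Str.isIn "file" (PySem.Str.lower ((PySem.Dict.ofList event).getD "event" "")))
  let phases : List String := []
  let phases := if has_process_events then phases ++ ["Initial execution"] else phases
  let phases := if has_network_events then phases ++ ["Command and control"] else phases
  let phases := if has_file_events then phases ++ ["Data collection/exfiltration"] else phases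
  if phases.isEmpty then ["Unknown"] else phases

-- ===== PORT B =====
def pvPhaseNames : List String := ["Initial execution", "Command and control", "Data collection/exfiltration"]

def pvClassifyEvent (event : List (String × String)) : PySem.Set Int :=
  let indices : PySem.Set Int := PySem.Set.empty
  let ev := PySem.Str.lower ((PySem.Dict.ofList event).getD "event" "")
  let indices := if PySem.Str.isIn "process" ev then PySem.Set.add indices 0 else indices
  let indices := if (PySem.Dict.ofList event).get? "source" == some "Network" then PySem.Set.add indices 1 else indices
  let indices := if PySem.Str.isIn "file" ev then PySem.Set.add indices 2 else indices
  indices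

def pvLoop : List (List (String × String)) → PySem.Set Int → PySem.Set Int
  | [], found => found
  | e :: rest, found =>
    let found := PySem.Set.union found (pvClassifyEvent e)
    if PySem.Set.len found == 3 then found else pvLoop rest found

def identify_attack_phases_py_alt (timeline : List (List (String × String))) : List String :=
  let found := pvLoop timeline PySem.Set.empty
  let phases := ((PySem.List.enumerate pvPhaseNames).filter
    (fun p => PySem.Set.contains found p.1)).map (fun p => p.2)
  if phases.isEmpty then ["Unknown"] else phases

-- ===== PRECONDITION & SPEC =====
def Spec_identify_attack_phases_py (timeline : List (List (String × String))) (out : List String) : Prop := out = identify_attack_phases_py_alt timeline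
instance (timeline : List (List (String × String))) (out : List String) : Decidable (Spec_identify_attack_phases_py timeline out) := by unfold Spec_identify_attack_phases_py; infer_instance

-- ===== CLAIM (what is proved, stated in full; the proofs are below) =====
def Claim_equal_identify_attack_phases_py : Prop := ∀ (timeline : List (List (String × String))), Dom_identify_attack_phases_py timeline → Spec_identify_attack_phases_py timeline (identify_attack_phases_py timeline)

-- ===== LEMMAS AND PROOFS =====

-- Shape lemmas about the per-event if/add chain, abstracted over the three Booleans.
theorem pv_classify_shape (bp bn bf : Bool) (i : Int) :
    i ∈ (let s : PySem.Set Int := PySem.Set.empty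
         let s := if bp then PySem.Set.add s 0 else s
         let s := if bn then PySem.Set.add s 1 else s
         let s := if bf then PySem.Set.add s 2 else s
         s) ↔ (i = 0 ∧ bp = true) ∨ (i = 1 ∧ bn = true) ∨ (i = 2 ∧ bf = true) := by
  cases bp <;> cases bn <;> cases bf <;> simp [PySem.Set.add, PySem.Set.empty]

-- Membership in a single event's classification, in terms of A's three per-event predicates.
theorem pv_mem_classify (e : List (String × String)) (i : Int) :
    i ∈ pvClassifyEvent e ↔
      (i = 0 ∧ PySem.Str.isIn "process" (PySem.Str.lower ((PySem.Dict.ofList e).getD "event" "")) = true) ∨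
      (i = 1 ∧ ((PySem.Dict.ofList e).get? "source" == some "Network") = true) ∨
      (i = 2 ∧ PySem.Str.isIn "file" (PySem.Str.lower ((PySem.Dict.ofList e).getD "event" "")) = true) := by
  unfold pvClassifyEvent
  exact pv_classify_shape _ _ _ i

theorem pv_classify_sub (e : List (String × String)) :
    ∀ x ∈ pvClassifyEvent e, x = 0 ∨ x = 1 ∨ x = 2 := by
  intro x hx
  rcases (pv_mem_classify e x).1 hx with ⟨h, _⟩ | ⟨h, _⟩ | ⟨h, _⟩ <;> simp [h]

-- Pigeonhole: a nodup list of 3 elements drawn from {0,1,2} contains each of 0,1,2.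
theorem pv_three_full (l : List Int) (hnd : l.Nodup)
    (hsub : ∀ x ∈ l, x = 0 ∨ x = 1 ∨ x = 2) (hlen : l.length = 3) :
    ∀ i : Int, (i = 0 ∨ i = 1 ∨ i = 2) → i ∈ l := by
  have hsub2 : l ⊆ [0, 1, 2] := by
    intro x hx; rcases hsub x hx with h | h | h <;> simp [h]
  have hsp : List.Subperm l [0, 1, 2] := List.subperm_of_subset hnd hsub2
  have hperm : l.Perm [0, 1, 2] := hsp.perm_of_length_le (by simp [hlen])
  intro i hi
  rw [hperm.mem_iff]
  rcases hi with h | h | h <;> simp [h]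

-- The early-exit loop has the same members (on {0,1,2}) as the full union of all classifications:
-- once the set reaches size 3 it already holds 0, 1 and 2, so skipped events contribute nothing.
theorem pv_loop_mem (tl : List (List (String × String))) :
    ∀ (found : PySem.Set Int), found.Nodup → (∀ x ∈ found, x = 0 ∨ x = 1 ∨ x = 2) →
      ∀ i : Int, (i = 0 ∨ i = 1 ∨ i = 2) →
        (i ∈ pvLoop tl found ↔ i ∈ found ∨ ∃ e ∈ tl, i ∈ pvClassifyEvent e) := by
  induction tl with
  | nil => intro found _ _ i _; simp [pvLoop]
  | cons e rest ih =>
    intro found hnd hsub i hi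
    have hnd2 : (PySem.Set.union found (pvClassifyEvent e)).Nodup :=
      PySem.Set.nodup_union found (pvClassifyEvent e) hnd
    have hsub2 : ∀ x ∈ PySem.Set.union found (pvClassifyEvent e), x = 0 ∨ x = 1 ∨ x = 2 := by
      intro x hx
      rcases (PySem.Set.mem_union _ _ _).1 hx with h | h
      · exact hsub x h
      · exact pv_classify_sub e x h
    rw [pvLoop]
    by_cases hb : (PySem.Set.len (PySem.Set.union found (pvClassifyEvent e)) == 3) = true
    · rw [if_pos hb]
      have hlen : (PySem.Set.union found (pvClassifyEvent e)).length = 3 := by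
        simp only [PySem.Set.len, beq_iff_eq] at hb
        omega
      have hfull := pv_three_full _ hnd2 hsub2 hlen
      constructor
      · intro h
        rcases (PySem.Set.mem_union _ _ _).1 h with h | h
        · exact Or.inl h
        · exact Or.inr ⟨e, by simp, h⟩
      · intro _; exact hfull i hi
    · rw [if_neg hb, ih _ hnd2 hsub2 i hi]
      constructor
      · rintro (h | ⟨e', he', hc⟩)
        · rcases (PySem.Set.mem_union _ _ _).1 h with h | h
          · exact Or.inl h
          · exact Or.inr ⟨e, List.mem_cons_self, h⟩
        · exact Or.inr ⟨e', List.mem_cons_of_mem _ he', hc⟩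
      · rintro (h | ⟨e', he', hc⟩)
        · exact Or.inl ((PySem.Set.mem_union _ _ _).2 (Or.inl h))
        · rcases List.mem_cons.1 he' with rfl | he'
          · exact Or.inl ((PySem.Set.mem_union _ _ _).2 (Or.inr hc))
          · exact Or.inr ⟨e', he', hc⟩

-- ===== VERDICT (by name: the statement is the Claim_ definition above) =====
theorem identify_attack_phases_py_spec : Claim_equal_identify_attack_phases_py := by
  intro timeline _
  unfold Spec_identify_attack_phases_py identify_attack_phases_py identify_attack_phases_py_alt
  have hmem := pv_loop_mem timeline PySem.Set.empty
    (by simp [PySem.Set.empty]) (by simp [PySem.Set.empty])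
  have h0 : PySem.Set.contains (pvLoop timeline PySem.Set.empty) 0
      = timeline.any (fun event => PySem.Str.isIn "process" (PySem.Str.lower ((PySem.Dict.ofList event).getD "event" ""))) := by
    rw [Bool.eq_iff_iff, PySem.Set.contains_iff, hmem 0 (by left; rfl), List.any_eq_true]
    simp [PySem.Set.empty, pv_mem_classify]
  have h1 : PySem.Set.contains (pvLoop timeline PySem.Set.empty) 1
      = timeline.any (fun event => (PySem.Dict.ofList event).get? "source" == some "Network") := by
    rw [Bool.eq_iff_iff, PySem.Set.contains_iff, hmem 1 (by right; left; rfl), List.any_eq_true]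
    simp [PySem.Set.empty, pv_mem_classify]
  have h2 : PySem.Set.contains (pvLoop timeline PySem.Set.empty) 2
      = timeline.any (fun event => PySem.Str.isIn "file" (PySem.Str.lower ((PySem.Dict.ofList event).getD "event" ""))) := by
    rw [Bool.eq_iff_iff, PySem.Set.contains_iff, hmem 2 (by right; right; rfl), List.any_eq_true]
    simp [PySem.Set.empty, pv_mem_classify]
  simp only [pvPhaseNames, PySem.List.enumerate_cons, PySem.List.enumerate_nil, List.filter]
  rw [show ((0:Int)+1+1) = 2 from rfl, show ((0:Int)+1) = 1 from rfl]
  simp only [h0, h1, h2]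
  generalize timeline.any (fun event => PySem.Str.isIn "process" (PySem.Str.lower ((PySem.Dict.ofList event).getD "event" ""))) = bp
  generalize timeline.any (fun event => (PySem.Dict.ofList event).get? "source" == some "Network") = bn
  generalize timeline.any (fun event => PySem.Str.isIn "file" (PySem.Str.lower ((PySem.Dict.ofList event).getD "event" ""))) = bf
  cases bp <;> cases bn <;> cases bf <;> rfl
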